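-- pv_equiv track=rewrite | github.com/JangKyungJoo/2ndProject | server/preprocessor.py | numberMapping
-- ===== SOURCE A (Python) =====
-- def numberMapping(orifile, compfile):
--     dic = {}
--     number = 0
--     inputs = [orifile, compfile]
--     outputs = []
--
--     for input in inputs:
--         retList = []
--         for tokList in input:
--             midList = []
--             for token in tokList:
--                 if dic.get(token, -1) == -1:
--                     dic[token] = number
--                     number += 1
--                 midList.append(dic[token])
--             retList.append(midList)
--         outputs.append(retList)
--
--     return outputs[0], outputs[1]
-- ===== SOURCE B (Python) =====
-- def numberMapping(orifile, compfile):
--     # Pass 1: assign ids by first appearance across orifile then compfile.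
--     dic = {}
--     for part in (orifile, compfile):
--         for tokList in part:
--             for token in tokList:
--                 if token not in dic:
--                     dic[token] = len(dic)
--     # Pass 2: map every token through the finished dictionary.
--     def mp(part):
--         return [[dic[token] for token in tokList] for tokList in part]
--     return mp(orifile), mp(compfile)
-- ===== Notes on version B (the rewrite author's own statement) =====
-- stated objective: alternative
-- what changed: B separates the work into two distinct traversals: a first pass that only builds the token->id dictionary (id = current dict size at first appearance) and a second pass that maps every token through the finished dictionary with comprehensions, whereas A interleaves dict-building and output-building in one pass with an explicit counter and a get(token,-1) sentinel test.
import Mathlib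
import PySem

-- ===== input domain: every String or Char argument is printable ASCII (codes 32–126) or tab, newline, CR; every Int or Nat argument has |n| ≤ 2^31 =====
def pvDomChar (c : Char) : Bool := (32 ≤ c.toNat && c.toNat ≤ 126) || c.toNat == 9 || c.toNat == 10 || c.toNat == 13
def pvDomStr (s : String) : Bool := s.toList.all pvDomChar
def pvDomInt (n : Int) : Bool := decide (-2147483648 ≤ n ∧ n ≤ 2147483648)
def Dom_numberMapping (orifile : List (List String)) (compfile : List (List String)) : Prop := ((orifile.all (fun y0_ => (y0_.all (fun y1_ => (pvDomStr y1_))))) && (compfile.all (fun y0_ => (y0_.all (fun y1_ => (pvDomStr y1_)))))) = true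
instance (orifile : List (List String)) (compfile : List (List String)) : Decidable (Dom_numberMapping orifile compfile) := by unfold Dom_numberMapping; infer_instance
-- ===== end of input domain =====

-- B replaces A's single interleaved pass (counter + get(token,-1) sentinel) by two separate
-- traversals: build the token->id dict first (id = dict size at first sight), then map everything
-- through the finished dict; objective: alternative decomposition, same cost.

-- ===== PORT A =====
-- inner 'for token in tokList' loop: state (dic, number), appends dic[token]
-- (dic[token] is read right after the key is guaranteed present, ported as getD _ 0 — exact here)
def aTok (dic : PySem.Dict String Int) (n : Int) : List String → PySem.Dict String Int × Int × List Int
  | [] => (dic, n, [])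
  | t :: ts =>
    if dic.getD t (-1) = -1 then
      let dic' := dic.insert t n
      let r := aTok dic' (n + 1) ts
      (r.1, r.2.1, dic'.getD t 0 :: r.2.2)
    else
      let r := aTok dic n ts
      (r.1, r.2.1, dic.getD t 0 :: r.2.2)

-- middle 'for tokList in input' loop
def aRows (dic : PySem.Dict String Int) (n : Int) : List (List String) → PySem.Dict String Int × Int × List (List Int)
  | [] => (dic, n, [])
  | row :: rows =>
    let m := aTok dic n row
    let r := aRows m.1 m.2.1 rows
    (r.1, r.2.1, m.2.2 :: r.2.2)

def numberMapping (orifile : List (List String)) (compfile : List (List String)) : List (List Int) × List (List Int) :=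
  let r1 := aRows PySem.Dict.empty 0 orifile
  let r2 := aRows r1.1 r1.2.1 compfile
  (r1.2.2, r2.2.2)

-- ===== PORT B =====
-- pass 1: only build the dictionary; a new token gets id len(dic)
def bTok (dic : PySem.Dict String Int) : List String → PySem.Dict String Int
  | [] => dic
  | t :: ts => if dic.contains t then bTok dic ts else bTok (dic.insert t (dic.size : Int)) ts

def bRows (dic : PySem.Dict String Int) : List (List String) → PySem.Dict String Int
  | [] => dic
  | row :: rows => bRows (bTok dic row) rows

-- pass 2: map every token through the finished dict (dic[token] always present, ported as getD _ 0)
def bMap (dic : PySem.Dict String Int) (part : List (List String)) : List (List Int) :=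
  part.map (fun tl => tl.map (fun t => dic.getD t 0))

def numberMapping_alt (orifile : List (List String)) (compfile : List (List String)) : List (List Int) × List (List Int) :=
  let d := bRows (bRows PySem.Dict.empty orifile) compfile
  (bMap d orifile, bMap d compfile)

-- ===== PRECONDITION & SPEC =====
def Spec_numberMapping (orifile : List (List String)) (compfile : List (List String)) (out : List (List Int) × List (List Int)) : Prop := out = numberMapping_alt orifile compfile
instance (orifile : List (List String)) (compfile : List (List String)) (out : List (List Int) × List (List Int)) : Decidable (Spec_numberMapping orifile compfile out) := by unfold Spec_numberMapping; infer_instance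

-- ===== CLAIM (what is proved, stated in full; the proofs are below) =====
def Claim_equal_numberMapping : Prop := ∀ (orifile : List (List String)) (compfile : List (List String)), Dom_numberMapping orifile compfile → Spec_numberMapping orifile compfile (numberMapping orifile compfile)

-- ===== LEMMAS AND PROOFS =====

-- d' keeps every binding of d
def pvSub (d d' : PySem.Dict String Int) : Prop :=
  ∀ t v, d.get? t = some v → d'.get? t = some v

-- loop invariant of A: counter = dict size, every stored id in [0, n)
def pvInv (d : PySem.Dict String Int) (n : Int) : Prop :=
  (d.size : Int) = n ∧ ∀ t v, d.get? t = some v → 0 ≤ v ∧ v < n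

theorem pvSub_refl (d : PySem.Dict String Int) : pvSub d d := fun _ _ h => h

theorem pvSub_trans {a b c : PySem.Dict String Int} (h1 : pvSub a b) (h2 : pvSub b c) : pvSub a c :=
  fun t v h => h2 t v (h1 t v h)

theorem pvSub_insert_fresh (d : PySem.Dict String Int) (k : String) (v : Int)
    (h : d.get? k = none) : pvSub d (d.insert k v) := by
  intro t w hw
  rw [PySem.Dict.get?_insert]
  split
  · next he => rw [he] at hw; rw [hw] at h; exact absurd h (by simp)
  · exact hw

-- the key step: A's inner loop produces B's dict, the counter stays its size,
-- the invariant is preserved, and the emitted ids equal lookups in ANY extension of the result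
theorem tok_main : ∀ (ts : List String) (d : PySem.Dict String Int) (n : Int), pvInv d n →
    (aTok d n ts).1 = bTok d ts
    ∧ (aTok d n ts).2.1 = ((bTok d ts).size : Int)
    ∧ pvInv (bTok d ts) ((bTok d ts).size : Int)
    ∧ pvSub d (bTok d ts)
    ∧ ∀ D, pvSub (bTok d ts) D → (aTok d n ts).2.2 = ts.map (fun t => D.getD t 0) := by
  intro ts
  induction ts with
  | nil => intro d n hinv; exact ⟨rfl, by simpa [aTok, bTok] using hinv.1.symm, by simpa [bTok] using hinv.1 ▸ hinv, pvSub_refl d, fun D _ => rfl⟩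
  | cons t ts ih =>
    intro d n hinv
    obtain ⟨hsz, hvals⟩ := hinv
    by_cases habs : d.get? t = none
    · -- fresh token: both branches insert, A with n, B with size = n
      have hA : d.getD t (-1) = -1 := by rw [PySem.Dict.getD_eq_get?_getD, habs]; rfl
      have hB : d.contains t = false := (PySem.Dict.get?_eq_none_iff_contains d t).1 habs
      have hsz' : ((d.insert t n).size : Int) = n + 1 := by
        rw [PySem.Dict.size_insert]; simp [hB]; omega
      have hinv' : pvInv (d.insert t n) (n + 1) := by
        refine ⟨hsz', ?_⟩
        intro u v hv
        rw [PySem.Dict.get?_insert] at hv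
        split at hv
        · cases hv; omega
        · have := hvals u v hv; omega
      have heq : d.insert t (d.size : Int) = d.insert t n := by rw [hsz]
      have eA : aTok d n (t :: ts) =
          ((aTok (d.insert t n) (n + 1) ts).1, (aTok (d.insert t n) (n + 1) ts).2.1,
            (d.insert t n).getD t 0 :: (aTok (d.insert t n) (n + 1) ts).2.2) := by
        simp [aTok, hA]
      have eB : bTok d (t :: ts) = bTok (d.insert t n) ts := by
        simp [bTok, hB]; rw [heq]
      obtain ⟨ih1, ih2, ih3, ih4, ih5⟩ := ih (d.insert t n) (n + 1) hinv'
      rw [eA, eB]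
      refine ⟨ih1, ih2, ih3, pvSub_trans (pvSub_insert_fresh d t n habs) ih4, ?_⟩
      intro D hD
      have hget : (d.insert t n).get? t = some n := PySem.Dict.get?_insert_self d t n
      have hD' : D.get? t = some n := hD t n (ih4 t n hget)
      simp only [List.map]
      rw [PySem.Dict.getD_of_get?_eq_some _ _ hget, PySem.Dict.getD_of_get?_eq_some _ _ hD',
        ih5 D hD]
    · -- known token: neither side changes the dict; the emitted id is the stored one
      obtain ⟨v, hv⟩ := Option.ne_none_iff_exists'.1 habs
      have hvpos := hvals t v hv
      have hA : ¬ d.getD t (-1) = -1 := by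
        rw [PySem.Dict.getD_of_get?_eq_some _ _ hv]; omega
      have hB : d.contains t = true := by
        rcases Bool.eq_false_or_eq_true (d.contains t) with h | h
        · exact h
        · exact absurd ((PySem.Dict.get?_eq_none_iff_contains d t).2 h) habs
      have eA : aTok d n (t :: ts) =
          ((aTok d n ts).1, (aTok d n ts).2.1, d.getD t 0 :: (aTok d n ts).2.2) := by
        simp [aTok, hA]
      have eB : bTok d (t :: ts) = bTok d ts := by simp [bTok, hB]
      obtain ⟨ih1, ih2, ih3, ih4, ih5⟩ := ih d n ⟨hsz, hvals⟩
      rw [eA, eB]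
      refine ⟨ih1, ih2, ih3, ih4, ?_⟩
      intro D hD
      have hD' : D.get? t = some v := hD t v (ih4 t v hv)
      simp only [List.map]
      rw [PySem.Dict.getD_of_get?_eq_some _ _ hv, PySem.Dict.getD_of_get?_eq_some _ _ hD',
        ih5 D hD]

-- the same statement lifted to the row loop
theorem rows_main : ∀ (rows : List (List String)) (d : PySem.Dict String Int) (n : Int), pvInv d n →
    (aRows d n rows).1 = bRows d rows
    ∧ (aRows d n rows).2.1 = ((bRows d rows).size : Int)
    ∧ pvInv (bRows d rows) ((bRows d rows).size : Int)
    ∧ pvSub d (bRows d rows)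
    ∧ ∀ D, pvSub (bRows d rows) D → (aRows d n rows).2.2 = rows.map (fun tl => tl.map (fun t => D.getD t 0)) := by
  intro rows
  induction rows with
  | nil => intro d n hinv; exact ⟨rfl, by simpa [aRows, bRows] using hinv.1.symm, by simpa [bRows] using hinv.1 ▸ hinv, pvSub_refl d, fun D _ => rfl⟩
  | cons row rows ih =>
    intro d n hinv
    obtain ⟨t1, t2, t3, t4, t5⟩ := tok_main row d n hinv
    obtain ⟨i1, i2, i3, i4, i5⟩ := ih (bTok d row) ((bTok d row).size : Int) t3
    have key : aRows (aTok d n row).1 (aTok d n row).2.1 rows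
        = aRows (bTok d row) ((bTok d row).size : Int) rows := by rw [t1, t2]
    have eA : aRows d n (row :: rows) =
        ((aRows (aTok d n row).1 (aTok d n row).2.1 rows).1,
          (aRows (aTok d n row).1 (aTok d n row).2.1 rows).2.1,
          (aTok d n row).2.2 :: (aRows (aTok d n row).1 (aTok d n row).2.1 rows).2.2) := rfl
    have eB : bRows d (row :: rows) = bRows (bTok d row) rows := rfl
    rw [eA, eB, key]
    refine ⟨i1, i2, i3, pvSub_trans t4 i4, ?_⟩
    intro D hD
    simp only [List.map]
    rw [t5 D (pvSub_trans i4 hD), i5 D hD]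

theorem pvInv_empty : pvInv (PySem.Dict.empty : PySem.Dict String Int) 0 := by
  refine ⟨by simp, ?_⟩
  intro t v hv
  rw [PySem.Dict.get?_empty] at hv
  exact absurd hv (by simp)

-- ===== VERDICT (by name: the statement is the Claim_ definition above) =====
theorem numberMapping_spec : Claim_equal_numberMapping := by
  intro orifile compfile _
  obtain ⟨a1, a2, a3, a4, a5⟩ := rows_main orifile PySem.Dict.empty 0 pvInv_empty
  obtain ⟨b1, b2, b3, b4, b5⟩ :=
    rows_main compfile (bRows PySem.Dict.empty orifile) ((bRows PySem.Dict.empty orifile).size : Int) a3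
  have key : aRows (aRows PySem.Dict.empty 0 orifile).1 (aRows PySem.Dict.empty 0 orifile).2.1 compfile
      = aRows (bRows PySem.Dict.empty orifile) ((bRows PySem.Dict.empty orifile).size : Int) compfile := by
    rw [a1, a2]
  show ((aRows PySem.Dict.empty 0 orifile).2.2,
      (aRows (aRows PySem.Dict.empty 0 orifile).1 (aRows PySem.Dict.empty 0 orifile).2.1 compfile).2.2)
    = (bMap (bRows (bRows PySem.Dict.empty orifile) compfile) orifile,
       bMap (bRows (bRows PySem.Dict.empty orifile) compfile) compfile)
  rw [key]
  refine Prod.ext ?_ ?_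
  · exact a5 _ b4
  · exact b5 _ (pvSub_refl _)
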